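-- pv_equiv track=rewrite | github.com/MrBrantCode/unitest_baseline | mut_generate/mist_train_taco/taco_69/solution.py | find_matched_words
-- ===== SOURCE A (Python) =====
-- def find_matched_words(dict_list, pattern):
--     def is_match(word, pattern):
--         if len(word) != len(pattern):
--             return False
--         char_map = {}
--         used_chars = set()
--         for w_char, p_char in zip(word, pattern):
--             if w_char in char_map:
--                 if char_map[w_char] != p_char:
--                     return False
--             else:
--                 if p_char in used_chars:
--                     return False
--                 char_map[w_char] = p_char
--                 used_chars.add(p_char)
--         return True
--
--     matched_words = [word for word in dict_list if is_match(word, pattern)]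
--     return sorted(matched_words)
-- ===== SOURCE B (Python) =====
-- def find_matched_words(dict_list, pattern):
--     def normalize(s):
--         first = {}
--         out = []
--         for i, c in enumerate(s):
--             if c not in first:
--                 first[c] = i
--             out.append(first[c])
--         return tuple(out)
--
--     target = normalize(pattern)
--     return sorted(w for w in dict_list if normalize(w) == target)
-- ===== Notes on version B (the rewrite author's own statement) =====
-- stated objective: simpler
-- what changed: Replaces the per-word forward-map + used-chars bijection check with a canonical form: each string is normalized to its tuple of first-occurrence indices, computed once for the pattern, and words are kept iff their normal form equals the pattern's.
import Mathlib
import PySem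

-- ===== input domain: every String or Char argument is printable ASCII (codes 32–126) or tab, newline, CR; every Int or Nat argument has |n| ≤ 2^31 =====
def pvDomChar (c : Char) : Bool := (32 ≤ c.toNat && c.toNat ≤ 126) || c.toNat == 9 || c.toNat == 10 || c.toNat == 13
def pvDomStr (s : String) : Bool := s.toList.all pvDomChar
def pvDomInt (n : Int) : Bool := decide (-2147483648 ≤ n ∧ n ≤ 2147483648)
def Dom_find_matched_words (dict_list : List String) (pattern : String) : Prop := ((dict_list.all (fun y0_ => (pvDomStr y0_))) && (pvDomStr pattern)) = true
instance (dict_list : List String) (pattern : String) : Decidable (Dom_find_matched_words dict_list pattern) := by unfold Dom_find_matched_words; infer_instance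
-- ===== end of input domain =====

-- B normalizes each string to its first-occurrence-index form and filters by equality with the
-- pattern's form, replacing A's per-word forward-map + used-set bijection check (objective: simpler).

-- ===== PORT A =====
-- the loop of is_match over zip(word, pattern), carrying char_map and used_chars
def isMatchAux : List (Char × Char) → PySem.Dict Char Char → PySem.Set Char → Bool
  | [], _, _ => true
  | (wc, pc) :: rest, cm, used =>
    match cm.get? wc with
    | some q => if q == pc then isMatchAux rest cm used else false
    | none =>
      if PySem.Set.contains used pc then false
      else isMatchAux rest (cm.insert wc pc) (PySem.Set.add used pc)

def isMatch (word pattern : String) : Bool :=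
  if word.toList.length != pattern.toList.length then false
  else isMatchAux (word.toList.zip pattern.toList) PySem.Dict.empty ([] : PySem.Set Char)

def find_matched_words (dict_list : List String) (pattern : String) : List String :=
  PySem.List.sorted (dict_list.filter (fun word => isMatch word pattern)) (fun x => x) false

-- ===== PORT B =====
-- normalize's loop: out gets, for each char, the index of its first occurrence
def pyNormAux : List Char → PySem.Dict Char Nat → Nat → List Nat
  | [], _, _ => []
  | c :: cs, first, i =>
    match first.get? c with
    | some j => j :: pyNormAux cs first (i + 1)
    | none => i :: pyNormAux cs (first.insert c i) (i + 1)

def pyNorm (s : List Char) : List Nat := pyNormAux s PySem.Dict.empty 0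

def find_matched_words_alt (dict_list : List String) (pattern : String) : List String :=
  let target := pyNorm pattern.toList
  PySem.List.sorted (dict_list.filter (fun w => pyNorm w.toList == target)) (fun x => x) false

-- ===== PRECONDITION & SPEC =====
def Spec_find_matched_words (dict_list : List String) (pattern : String) (out : List String) : Prop := out = find_matched_words_alt dict_list pattern
instance (dict_list : List String) (pattern : String) (out : List String) : Decidable (Spec_find_matched_words dict_list pattern out) := by unfold Spec_find_matched_words; infer_instance

-- ===== CLAIM (what is proved, stated in full; the proofs are below) =====
def Claim_equal_find_matched_words : Prop := ∀ (dict_list : List String) (pattern : String), Dom_find_matched_words dict_list pattern → Spec_find_matched_words dict_list pattern (find_matched_words dict_list pattern)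

-- ===== LEMMAS AND PROOFS =====

lemma length_pyNormAux (s : List Char) : ∀ (d : PySem.Dict Char Nat) (i : Nat),
    (pyNormAux s d i).length = s.length := by
  induction s with
  | nil => intro d i; rfl
  | cons c cs ih =>
    intro d i
    cases h : d.get? c with
    | some j => simp [pyNormAux, h, ih]
    | none => simp [pyNormAux, h, ih]

-- loop invariant: A's (char_map, used_chars) state corresponds to B's two first-occurrence dicts
lemma matchAux_iff_norm (ws : List Char) : ∀ (ps : List Char) (cm : PySem.Dict Char Char)
    (used : PySem.Set Char) (dw dp : PySem.Dict Char Nat) (i : Nat),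
    ws.length = ps.length →
    (∀ wc pc, cm.get? wc = some pc → ∃ j, dw.get? wc = some j ∧ dp.get? pc = some j) →
    (∀ wc, cm.get? wc = none → dw.get? wc = none) →
    (∀ q, q ∈ used ↔ dp.contains q = true) →
    (∀ c j, dw.get? c = some j → j < i) →
    (∀ c j, dp.get? c = some j → j < i) →
    (∀ p p' j, dp.get? p = some j → dp.get? p' = some j → p = p') →
    (isMatchAux (ws.zip ps) cm used = true ↔ pyNormAux ws dw i = pyNormAux ps dp i) := by
  induction ws with
  | nil =>
    intro ps cm used dw dp i hlen _ _ _ _ _ _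
    cases ps with
    | nil => simp [isMatchAux, pyNormAux]
    | cons p ps' => simp at hlen
  | cons wc ws' ih =>
    intro ps cm used dw dp i hlen h1 h2 h3 h4 h5 h6
    cases ps with
    | nil => simp at hlen
    | cons pc ps' =>
      simp only [List.length_cons, Nat.add_right_cancel_iff] at hlen
      rw [List.zip_cons_cons]
      cases hq : cm.get? wc with
      | some q =>
        obtain ⟨j, hjw, hjp⟩ := h1 wc q hq
        by_cases hqp : q = pc
        · subst hqp
          have ih' := ih ps' cm used dw dp (i + 1) hlen h1 h2 h3
            (fun c j h => Nat.lt_succ_of_lt (h4 c j h))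
            (fun c j h => Nat.lt_succ_of_lt (h5 c j h)) h6
          simp only [isMatchAux, hq, BEq.rfl, if_true, pyNormAux, hjw, hjp,
            List.cons.injEq, true_and]
          exact ih'
        · -- mapped char mismatches: A returns False, heads of the normal forms differ
          have hne : pyNormAux (wc :: ws') dw i ≠ pyNormAux (pc :: ps') dp i := by
            cases hp : dp.get? pc with
            | none =>
              have hj : j < i := h5 q j hjp
              simp only [pyNormAux, hjw, hp]
              intro hcontra
              simp only [List.cons.injEq] at hcontra
              omega
            | some j' =>
              have hjj : j' ≠ j := fun h => hqp ((h6 pc q j (h ▸ hp) hjp).symm)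
              simp only [pyNormAux, hjw, hp]
              intro hcontra
              simp only [List.cons.injEq] at hcontra
              exact hjj hcontra.1.symm
          have hf : (q == pc) = false := by simp [hqp]
          simp only [isMatchAux, hq, hf, Bool.false_eq_true, if_false]
          simp [hne]
      | none =>
        have hwnone : dw.get? wc = none := h2 wc hq
        by_cases hu : pc ∈ used
        · -- target char already used by another mapping: A returns False, heads differ
          have hcon : PySem.Set.contains used pc = true := by
            rw [PySem.Set.contains_iff]; exact hu
          have hpc : dp.contains pc = true := (h3 pc).mp hu
          obtain ⟨j', hj'⟩ : ∃ j', dp.get? pc = some j' := by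
            rcases hps : dp.get? pc with _ | j'
            · rw [PySem.Dict.get?_eq_none_iff_contains] at hps
              rw [hps] at hpc; cases hpc
            · exact ⟨j', rfl⟩
          have hji : j' < i := h5 pc j' hj'
          have hne : pyNormAux (wc :: ws') dw i ≠ pyNormAux (pc :: ps') dp i := by
            simp only [pyNormAux, hwnone, hj']
            intro hcontra
            simp only [List.cons.injEq] at hcontra
            omega
          simp only [isMatchAux, hq, hcon, if_true]
          simp [hne]
        · -- fresh pair: both sides extend their state and recurse
          have hpnone : dp.get? pc = none := by
            rw [PySem.Dict.get?_eq_none_iff_contains]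
            by_contra h
            exact hu ((h3 pc).mpr (by simpa using h))
          have hcon : PySem.Set.contains used pc = false := by
            rw [← Bool.not_eq_true, PySem.Set.contains_iff]; exact hu
          have h1' : ∀ wc' pc', (cm.insert wc pc).get? wc' = some pc' →
              ∃ j, (dw.insert wc i).get? wc' = some j ∧ (dp.insert pc i).get? pc' = some j := by
            intro wc' pc' h
            rw [PySem.Dict.get?_insert] at h
            by_cases hwc : wc' = wc
            · rw [if_pos hwc] at h
              have hpp : pc' = pc := by injection h with h; exact h.symm
              subst hwc; subst hpp
              exact ⟨i, by rw [PySem.Dict.get?_insert, if_pos rfl],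
                by rw [PySem.Dict.get?_insert, if_pos rfl]⟩
            · rw [if_neg hwc] at h
              obtain ⟨j, hjw, hjp⟩ := h1 wc' pc' h
              have hpcne : pc' ≠ pc := by
                intro hh; rw [hh, hpnone] at hjp; cases hjp
              exact ⟨j, by rw [PySem.Dict.get?_insert, if_neg hwc]; exact hjw,
                by rw [PySem.Dict.get?_insert, if_neg hpcne]; exact hjp⟩
          have h2' : ∀ wc', (cm.insert wc pc).get? wc' = none →
              (dw.insert wc i).get? wc' = none := by
            intro wc' h
            rw [PySem.Dict.get?_insert] at h
            by_cases hwc : wc' = wc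
            · rw [if_pos hwc] at h; simp at h
            · rw [if_neg hwc] at h
              rw [PySem.Dict.get?_insert, if_neg hwc]
              exact h2 wc' h
          have h3' : ∀ q, q ∈ PySem.Set.add used pc ↔ (dp.insert pc i).contains q = true := by
            intro q
            rw [PySem.Set.mem_add, PySem.Dict.contains_insert]
            simp only [Bool.or_eq_true, beq_iff_eq]
            rw [h3 q]; tauto
          have h4' : ∀ c j, (dw.insert wc i).get? c = some j → j < i + 1 := by
            intro c j h
            rw [PySem.Dict.get?_insert] at h
            by_cases hc : c = wc
            · rw [if_pos hc] at h; injection h with h; omega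
            · rw [if_neg hc] at h; exact Nat.lt_succ_of_lt (h4 c j h)
          have h5' : ∀ c j, (dp.insert pc i).get? c = some j → j < i + 1 := by
            intro c j h
            rw [PySem.Dict.get?_insert] at h
            by_cases hc : c = pc
            · rw [if_pos hc] at h; injection h with h; omega
            · rw [if_neg hc] at h; exact Nat.lt_succ_of_lt (h5 c j h)
          have h6' : ∀ p p' j, (dp.insert pc i).get? p = some j →
              (dp.insert pc i).get? p' = some j → p = p' := by
            intro p p' j hp hp'
            rw [PySem.Dict.get?_insert] at hp hp'
            by_cases he : p = pc <;> by_cases he' : p' = pc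
            · rw [he, he']
            · rw [if_pos he] at hp; rw [if_neg he'] at hp'
              injection hp with hp
              exact absurd (h5 p' j hp') (by omega)
            · rw [if_neg he] at hp; rw [if_pos he'] at hp'
              injection hp' with hp'
              exact absurd (h5 p j hp) (by omega)
            · rw [if_neg he] at hp; rw [if_neg he'] at hp'
              exact h6 p p' j hp hp'
          have ih' := ih ps' (cm.insert wc pc) (PySem.Set.add used pc)
            (dw.insert wc i) (dp.insert pc i) (i + 1) hlen h1' h2' h3' h4' h5' h6'
          simp only [isMatchAux, hq, hcon, Bool.false_eq_true, if_false, pyNormAux,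
            hwnone, hpnone, List.cons.injEq, true_and]
          exact ih'

lemma isMatch_eq (w p : String) : isMatch w p = (pyNorm w.toList == pyNorm p.toList) := by
  unfold isMatch pyNorm
  by_cases hlen : w.toList.length = p.toList.length
  · have hmain := matchAux_iff_norm w.toList p.toList PySem.Dict.empty ([] : PySem.Set Char)
      PySem.Dict.empty PySem.Dict.empty 0 hlen
      (by intro wc pc h; rw [PySem.Dict.get?_empty] at h; cases h)
      (by intro wc _; exact PySem.Dict.get?_empty wc)
      (by intro q; simp [PySem.Dict.contains_empty])
      (by intro c j h; rw [PySem.Dict.get?_empty] at h; cases h)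
      (by intro c j h; rw [PySem.Dict.get?_empty] at h; cases h)
      (by intro a b j h; rw [PySem.Dict.get?_empty] at h; cases h)
    simp only [hlen, bne_self_eq_false, if_neg, Bool.false_eq_true, not_false_eq_true]
    rw [Bool.eq_iff_iff, hmain, beq_iff_eq]
  · have hbne : (w.toList.length != p.toList.length) = true := by
      simpa using hlen
    rw [hbne]
    have : pyNormAux w.toList PySem.Dict.empty 0 ≠ pyNormAux p.toList PySem.Dict.empty 0 := by
      intro h
      apply hlen
      have := congrArg List.length h
      rwa [length_pyNormAux, length_pyNormAux] at this
    simp [this]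

-- ===== VERDICT (by name: the statement is the Claim_ definition above) =====
theorem find_matched_words_spec : Claim_equal_find_matched_words := by
  intro dict_list pattern _
  unfold Spec_find_matched_words find_matched_words find_matched_words_alt
  have : (fun word => isMatch word pattern)
      = (fun w => pyNorm w.toList == pyNorm pattern.toList) :=
    funext fun w => isMatch_eq w pattern
  rw [this]
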